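-- pv_equiv track=rewrite | github.com/GitMsw/AlgorithmLearning | 02基础算法/07动态规划/合唱队.py | solution
-- ===== SOURCE A (Python) =====
-- def solution(arr: list) -> int:
--     c =len(arr)
--     res1 = [1 for i in range(c)]
--     res2 = [1 for i in range(c)]
--     res = [0 for i in range(c)]
--
--     for i in range(c):  # 从做左到右dp
--         for j in range(i):
--             if arr[i] <= arr[j]:
--                 continue
--             elif res1[i] < res1[j] + 1:
--                 res1[i] += 1
--     for i in range(c-1,-1,-1):  # 从右到左dp
--         for j in range(c-1,i,-1):
--             if arr[i] <= arr[j]: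
--                 continue
--             elif res2[i] < res2[j] + 1:
--                 res2[i] += 1
--     for i in range(c):
--         res[i]  =res1[i] + res2[i]
--
--     ret = c - max(res) + 1
--     return ret
-- ===== SOURCE B (Python) =====
-- def solution(arr: list) -> int:
--     # Patience sorting: LIS-ending lengths for each position in O(n log n).
--     def lis_lengths(a):
--         tails = []  # tails[k] = smallest tail value of a strictly increasing subseq of length k+1
--         out = []
--         for x in a:
--             lo, hi = 0, len(tails)
--             while lo < hi:
--                 mid = (lo + hi) // 2
--                 if tails[mid] < x:
--                     lo = mid + 1
--                 else:
--                     hi = mid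
--             if lo == len(tails):
--                 tails.append(x)
--             else:
--                 tails[lo] = x
--             out.append(lo + 1)
--         return out
--
--     c = len(arr)
--     up = lis_lengths(arr)
--     down = lis_lengths(arr[::-1])
--     best = max(up[i] + down[c - 1 - i] for i in range(c))
--     return c - best + 1
-- ===== Notes on version B (the rewrite author's own statement) =====
-- stated objective: faster
-- what changed: Replaces the two O(n^2) nested-loop DP passes (with A's increment-by-1 update) by patience sorting with a hand-written binary search, computing LIS-ending lengths in both directions in O(n log n); Pre_ excludes only the empty list, on which both A and B raise ValueError (max of an empty sequence).
-- outside the precondition, e.g. on solution([]): A raises ValueError, B raises ValueError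
import Mathlib
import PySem

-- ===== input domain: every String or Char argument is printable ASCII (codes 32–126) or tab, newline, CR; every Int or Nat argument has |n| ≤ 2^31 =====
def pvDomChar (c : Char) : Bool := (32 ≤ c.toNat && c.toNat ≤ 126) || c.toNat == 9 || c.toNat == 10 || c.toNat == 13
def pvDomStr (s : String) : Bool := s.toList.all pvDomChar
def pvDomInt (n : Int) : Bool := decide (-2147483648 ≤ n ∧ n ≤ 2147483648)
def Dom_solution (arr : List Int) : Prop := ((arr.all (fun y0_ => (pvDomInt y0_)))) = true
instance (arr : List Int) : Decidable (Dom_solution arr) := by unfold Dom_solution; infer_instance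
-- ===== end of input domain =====

-- B replaces A's two quadratic nested-loop DP passes by patience sorting with a hand-written
-- binary search (bidirectional LIS in O(n log n)); A and B agree on every nonempty arr
-- (both raise ValueError on [] via max() of an empty sequence).

-- ===== PORT A =====
-- A's first double loop (left-to-right dp over res1), transliterated.
def fwdA (arr : List Int) : List Int :=
  (PySem.List.pyRange 0 (arr.length : Int) 1).foldl (fun r1 i =>
    (PySem.List.pyRange 0 i 1).foldl (fun r1 j =>
      if PySem.List.pyGetD arr i 0 ≤ PySem.List.pyGetD arr j 0 then r1
      else if PySem.List.pyGetD r1 i 0 < PySem.List.pyGetD r1 j 0 + 1 then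
        PySem.List.pySetD r1 i (PySem.List.pyGetD r1 i 0 + 1)
      else r1) r1) (List.replicate arr.length 1)

-- A's second double loop (right-to-left dp over res2), transliterated.
def bwdA (arr : List Int) : List Int :=
  (PySem.List.pyRange ((arr.length : Int) - 1) (-1) (-1)).foldl (fun r2 i =>
    (PySem.List.pyRange ((arr.length : Int) - 1) i (-1)).foldl (fun r2 j =>
      if PySem.List.pyGetD arr i 0 ≤ PySem.List.pyGetD arr j 0 then r2
      else if PySem.List.pyGetD r2 i 0 < PySem.List.pyGetD r2 j 0 + 1 then
        PySem.List.pySetD r2 i (PySem.List.pyGetD r2 i 0 + 1)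
      else r2) r2) (List.replicate arr.length 1)

def solution (arr : List Int) : Int :=
  let c : Int := (arr.length : Int)
  let res1 := fwdA arr
  let res2 := bwdA arr
  let res := (PySem.List.pyRange 0 c 1).foldl (fun r i =>
    PySem.List.pySetD r i (PySem.List.pyGetD res1 i 0 + PySem.List.pyGetD res2 i 0))
    (List.replicate arr.length 0)
  c - (PySem.List.max? res (fun y => y)).getD 0 + 1

-- ===== PORT B =====
-- Source B's hand-written binary search (lo, hi are nonnegative Python ints, so Nat is exact,
-- and Python's (lo+hi)//2 on nonnegative ints is Nat division).
def bsLoop (tails : List Int) (x : Int) (lo hi : Nat) : Nat :=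
  if h : lo < hi then
    let mid := (lo + hi) / 2
    if PySem.List.pyGetD tails (mid : Int) 0 < x then bsLoop tails x (mid + 1) hi
    else bsLoop tails x lo mid
  else lo
termination_by hi - lo
decreasing_by
  · omega
  · omega

-- one iteration of Source B's lis_lengths loop body: state is (tails, out)
def lisStep (st : List Int × List Int) (x : Int) : List Int × List Int :=
  let tails := st.1
  let lo := bsLoop tails x 0 tails.length
  let tails' := if lo = tails.length then tails ++ [x] else tails.set lo x
  (tails', st.2 ++ [(lo : Int) + 1])

def lisLengths (a : List Int) : List Int := (a.foldl lisStep ([], [])).2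

def solution_alt (arr : List Int) : Int :=
  let c : Int := (arr.length : Int)
  let up := lisLengths arr
  let down := lisLengths arr.reverse
  let best := (PySem.List.max? ((PySem.List.pyRange 0 c 1).map
      (fun i => PySem.List.pyGetD up i 0 + PySem.List.pyGetD down (c - 1 - i) 0)) (fun y => y)).getD 0
  c - best + 1

-- ===== PRECONDITION & SPEC =====
-- A raises ValueError on arr = [] (max of an empty list); B raises there too.
def Pre_solution (arr : List Int) : Prop := arr ≠ []
instance (arr : List Int) : Decidable (Pre_solution arr) := by unfold Pre_solution; infer_instance
def pvWitness_solution : List Int := [1, 3, 2]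

def Spec_solution (arr : List Int) (out : Int) : Prop := out = solution_alt arr
instance (arr : List Int) (out : Int) : Decidable (Spec_solution arr out) := by unfold Spec_solution; infer_instance

-- ===== CLAIM (what is proved, stated in full; the proofs are below) =====
def Claim_equal_solution : Prop := ∀ (arr : List Int), Dom_solution arr → Pre_solution arr → Spec_solution arr (solution arr)

-- ===== LEMMAS AND PROOFS =====
def maxF (done : List (Int × Int)) (x : Int) : Int :=
  done.foldl (fun m p => if p.1 < x then max m p.2 else m) 0
def dpPairs (a : List Int) : List (Int × Int) :=
  a.foldl (fun done x => done ++ [(x, 1 + maxF done x)]) []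
def dpVals (a : List Int) : List Int := (dpPairs a).map (·.2)
def incrVal (done : List (Int × Int)) (x : Int) : Int :=
  done.foldl (fun cur p => if x ≤ p.1 then cur else if cur < p.2 + 1 then cur + 1 else cur) 1

def ChainP (done : List (Int × Int)) : Prop :=
  ∀ l p t, done = l ++ p :: t → 1 < p.2 → ∃ q ∈ l, q.1 < p.1 ∧ q.2 = p.2 - 1

theorem maxF_snoc (done : List (Int × Int)) (p : Int × Int) (x : Int) :
    maxF (done ++ [p]) x = if p.1 < x then max (maxF done x) p.2 else maxF done x := by
  simp [maxF, List.foldl_append]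

theorem incrVal_snoc (done : List (Int × Int)) (p : Int × Int) (x : Int) :
    incrVal (done ++ [p]) x =
      if x ≤ p.1 then incrVal done x
      else if incrVal done x < p.2 + 1 then incrVal done x + 1 else incrVal done x := by
  simp [incrVal, List.foldl_append]

theorem dpPairs_snoc (a : List Int) (x : Int) :
    dpPairs (a ++ [x]) = dpPairs a ++ [(x, 1 + maxF (dpPairs a) x)] := by
  simp [dpPairs, List.foldl_append]


theorem length_dpPairs (a : List Int) : (dpPairs a).length = a.length := by
  induction a using List.reverseRecOn with
  | nil => rfl
  | append_singleton a x ih => simp [dpPairs_snoc, ih]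

theorem map_fst_dpPairs (a : List Int) : (dpPairs a).map (·.1) = a := by
  induction a using List.reverseRecOn with
  | nil => rfl
  | append_singleton a x ih => simp [dpPairs_snoc, ih]

theorem maxF_nonneg (done : List (Int × Int)) (x : Int) : 0 ≤ maxF done x := by
  induction done using List.reverseRecOn with
  | nil => simp [maxF]
  | append_singleton d p ih =>
    rw [maxF_snoc]; split
    · exact le_trans ih (le_max_left _ _)
    · exact ih

theorem maxF_ub (done : List (Int × Int)) (x : Int) :
    ∀ p ∈ done, p.1 < x → p.2 ≤ maxF done x := by
  induction done using List.reverseRecOn with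
  | nil => simp
  | append_singleton d q ih =>
    intro p hp hx
    rcases List.mem_append.1 hp with h | h
    · rw [maxF_snoc]; split
      · exact le_max_of_le_left (ih p h hx)
      · exact ih p h hx
    · simp at h; subst h; rw [maxF_snoc, if_pos hx]; exact le_max_right _ _

theorem maxF_attain (done : List (Int × Int)) (x : Int) (h : 0 < maxF done x) :
    ∃ p ∈ done, p.1 < x ∧ p.2 = maxF done x := by
  induction done using List.reverseRecOn with
  | nil => simp [maxF] at h
  | append_singleton d q ih =>
    rw [maxF_snoc] at h ⊢
    by_cases hq : q.1 < x
    · rw [if_pos hq] at h ⊢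
      rcases le_total q.2 (maxF d x) with hle | hlt
      · rw [max_eq_left hle] at h ⊢
        obtain ⟨p, hp, h1, h2⟩ := ih h
        exact ⟨p, List.mem_append_left _ hp, h1, h2⟩
      · rw [max_eq_right hlt]
        exact ⟨q, List.mem_append_right _ (by simp), hq, rfl⟩
    · rw [if_neg hq] at h ⊢
      obtain ⟨p, hp, h1, h2⟩ := ih h
      exact ⟨p, List.mem_append_left _ hp, h1, h2⟩

theorem dp_pos (a : List Int) : ∀ p ∈ dpPairs a, 1 ≤ p.2 := by
  induction a using List.reverseRecOn with
  | nil => simp [dpPairs]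
  | append_singleton a x ih =>
    intro p hp
    rw [dpPairs_snoc] at hp
    rcases List.mem_append.1 hp with h | h
    · exact ih p h
    · have hnn := maxF_nonneg (dpPairs a) x
      simp at h; subst h
      show 1 ≤ 1 + maxF (dpPairs a) x
      omega

theorem chain_dpPairs (a : List Int) : ChainP (dpPairs a) := by
  induction a using List.reverseRecOn with
  | nil => intro l p t h; simp [dpPairs] at h
  | append_singleton a x ih =>
    intro l p t h h1
    rw [dpPairs_snoc] at h
    rcases List.eq_nil_or_concat t with rfl | ⟨t', y, rfl⟩
    · have hlen : (dpPairs a).length = l.length := by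
        have := congrArg List.length h; simp at this; omega
      obtain ⟨hdl, hv⟩ := List.append_inj h hlen
      simp at hv
      subst hdl
      rw [← hv] at h1 ⊢
      simp only at h1 ⊢
      have hM : 0 < maxF (dpPairs a) x := by omega
      obtain ⟨q, hq, hqx, hqv⟩ := maxF_attain (dpPairs a) x hM
      exact ⟨q, hq, hqx, by simp [hqv]⟩
    · have h2 : dpPairs a ++ [(x, 1 + maxF (dpPairs a) x)] = (l ++ p :: t') ++ [y] := by
        simpa using h
      have hlen : (dpPairs a).length = (l ++ p :: t').length := by
        have := congrArg List.length h2; simp at this ⊢; omega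
      obtain ⟨hdl, -⟩ := List.append_inj h2 hlen
      exact ih l p t' hdl h1

theorem chainP_prefix (d1 d2 : List (Int × Int)) (h : ChainP (d1 ++ d2)) : ChainP d1 := by
  intro l p t hd h1
  exact h l p (t ++ d2) (by simp [hd]) h1

theorem core_incr (done : List (Int × Int)) (x : Int) (hC : ChainP done)
    (hpos : ∀ p ∈ done, 1 ≤ p.2) :
    incrVal done x = 1 + maxF done x := by
  induction done using List.reverseRecOn with
  | nil => simp [incrVal, maxF]
  | append_singleton d p ih =>
    have hC' : ChainP d := chainP_prefix d [p] hC
    have hpos' : ∀ q ∈ d, 1 ≤ q.2 := fun q hq => hpos q (List.mem_append_left _ hq)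
    have IH := ih hC' hpos'
    rw [incrVal_snoc, maxF_snoc, IH]
    rcases le_or_gt x p.1 with hx | hx
    · rw [if_pos hx, if_neg (not_lt.mpr hx)]
    · rw [if_neg (not_le.mpr hx), if_pos hx]
      by_cases hlt : 1 + maxF d x < p.2 + 1
      · rw [if_pos hlt]
        have hp2 : p.2 = maxF d x + 1 := by
          by_cases h1 : 1 < p.2
          · obtain ⟨q, hq, hq1, hq2⟩ := hC d p [] rfl h1
            have := maxF_ub d x q hq (lt_trans hq1 hx)
            omega
          · have := hpos p (by simp)
            have := maxF_nonneg d x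
            omega
        rw [hp2, max_eq_right (by omega)]; ring
      · rw [if_neg hlt, max_eq_left (by omega)]


theorem pyGetD_append_lt (P S : List Int) (c j : Int) (h0 : 0 ≤ j) (h : j < (P.length : Int)) :
    PySem.List.pyGetD (P ++ c :: S) j 0 = PySem.List.pyGetD P j 0 := by
  obtain ⟨n, rfl⟩ := Int.eq_ofNat_of_zero_le h0
  have hn : n < P.length := by exact_mod_cast h
  simp [PySem.List.pyGetD_natCast, List.getD_eq_getElem?_getD, List.getElem?_append_left hn]

theorem pyGetD_append_gt (P S : List Int) (c j : Int) (h : (P.length : Int) < j) :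
    PySem.List.pyGetD (P ++ c :: S) j 0 = PySem.List.pyGetD S (j - P.length - 1) 0 := by
  obtain ⟨n, rfl⟩ := Int.eq_ofNat_of_zero_le (by omega : (0:Int) ≤ j)
  have hn : P.length < n := by exact_mod_cast h
  have : ((n : Int) - P.length - 1) = ((n - P.length - 1 : Nat) : Int) := by omega
  rw [this]
  simp [PySem.List.pyGetD_natCast, List.getD_eq_getElem?_getD]
  rw [List.getElem?_append_right (by omega), List.getElem?_cons]
  rw [if_neg (by omega)]

theorem pyGetD_append_self (P S : List Int) (c : Int) :
    PySem.List.pyGetD (P ++ c :: S) (P.length : Int) 0 = c := by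
  simp [PySem.List.pyGetD_natCast, List.getD_eq_getElem?_getD]

theorem pySetD_append_self (P S : List Int) (c v : Int) :
    PySem.List.pySetD (P ++ c :: S) (P.length : Int) v = P ++ v :: S := by
  rw [PySem.List.pySetD_natCast]
  rw [List.set_append_right _ _ (le_refl _)]
  simp

-- step 1: the inner loop writes only at index i; turn it into a fold over an accumulator
theorem step1 (arr W : List Int) (i : Int) (js : List Int)
    (hjs : ∀ j ∈ js, 0 ≤ j ∧ j ≠ i) :
    ∀ (P S : List Int) (cur : Int), (P.length : Int) = i →
    (∀ (c j : Int), j ∈ js → PySem.List.pyGetD (P ++ c :: S) j 0 = PySem.List.pyGetD W j 0) →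
    js.foldl (fun r1 j =>
      if PySem.List.pyGetD arr i 0 ≤ PySem.List.pyGetD arr j 0 then r1
      else if PySem.List.pyGetD r1 i 0 < PySem.List.pyGetD r1 j 0 + 1 then
        PySem.List.pySetD r1 i (PySem.List.pyGetD r1 i 0 + 1)
      else r1) (P ++ cur :: S)
    = P ++ (js.foldl (fun cur j =>
        if PySem.List.pyGetD arr i 0 ≤ PySem.List.pyGetD arr j 0 then cur
        else if cur < PySem.List.pyGetD W j 0 + 1 then cur + 1 else cur) cur) :: S := by
  induction js with
  | nil => intro P S cur hP hW; simp
  | cons j js ih =>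
    intro P S cur hP hW
    have hj := hjs j (by simp)
    have hji : PySem.List.pyGetD (P ++ cur :: S) j 0 = PySem.List.pyGetD W j 0 :=
      hW cur j (by simp)
    have hii : PySem.List.pyGetD (P ++ cur :: S) i 0 = cur := by
      rw [← hP]; exact pyGetD_append_self P S cur
    have hset : PySem.List.pySetD (P ++ cur :: S) i (cur + 1) = P ++ (cur + 1) :: S := by
      rw [← hP]; exact pySetD_append_self P S cur (cur + 1)
    simp only [List.foldl_cons]
    rw [hji, hii]
    by_cases h1 : PySem.List.pyGetD arr i 0 ≤ PySem.List.pyGetD arr j 0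
    · rw [if_pos h1, if_pos h1]
      exact ih (fun j hj => hjs j (by simp [hj])) P S cur hP
        (fun c j hj => hW c j (by simp [hj]))
    · rw [if_neg h1, if_neg h1]
      by_cases h2 : cur < PySem.List.pyGetD W j 0 + 1
      · rw [if_pos h2, if_pos h2, hset]
        exact ih (fun j hj => hjs j (by simp [hj])) P S (cur + 1) hP
          (fun c j hj => hW c j (by simp [hj]))
      · rw [if_neg h2, if_neg h2]
        exact ih (fun j hj => hjs j (by simp [hj])) P S cur hP
          (fun c j hj => hW c j (by simp [hj]))

-- step 2: a fold over indices that reads two lists is a fold over the pair list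
theorem step2 {α : Type} (g : α → Int → Int → α) (V W : List Int) :
    ∀ (js : List Int) (done : List (Int × Int)) (init : α)
    (hlen : js.length = done.length),
    (∀ k (hk : k < done.length),
      PySem.List.pyGetD V (js[k]'(by omega)) 0 = (done[k]).1 ∧
      PySem.List.pyGetD W (js[k]'(by omega)) 0 = (done[k]).2) →
    js.foldl (fun st j => g st (PySem.List.pyGetD V j 0) (PySem.List.pyGetD W j 0)) init
      = done.foldl (fun st p => g st p.1 p.2) init := by
  intro js
  induction js with
  | nil =>
    intro done init hlen _
    have : done = [] := List.eq_nil_of_length_eq_zero (by simpa using hlen.symm)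
    simp [this]
  | cons j js ih =>
    intro done init hlen hk
    cases done with
    | nil => simp at hlen
    | cons p done =>
      have h0 := hk 0 (by simp)
      simp only [List.getElem_cons_zero] at h0
      simp only [List.foldl_cons]
      rw [(by simpa using h0.1 : PySem.List.pyGetD V j 0 = p.1),
          (by simpa using h0.2 : PySem.List.pyGetD W j 0 = p.2)]
      exact ih done _ (by simpa using hlen) (fun k hk' => by
        have := hk (k + 1) (by simpa using Nat.succ_lt_succ hk')
        simpa using this)


theorem length_dpVals (a : List Int) : (dpVals a).length = a.length := by
  simp [dpVals, length_dpPairs]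

theorem incrVal_eq_dp (done : List (Int × Int)) (a : List Int) (x : Int)
    (h : done = dpPairs a) : incrVal done x = 1 + maxF done x := by
  subst h; exact core_incr _ _ (chain_dpPairs a) (dp_pos a)

theorem fwdA_prefix (arr : List Int) : ∀ n, n ≤ arr.length →
    (PySem.List.pyRange 0 (n : Int) 1).foldl (fun r1 i =>
      (PySem.List.pyRange 0 i 1).foldl (fun r1 j =>
        if PySem.List.pyGetD arr i 0 ≤ PySem.List.pyGetD arr j 0 then r1
        else if PySem.List.pyGetD r1 i 0 < PySem.List.pyGetD r1 j 0 + 1 then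
          PySem.List.pySetD r1 i (PySem.List.pyGetD r1 i 0 + 1)
        else r1) r1) (List.replicate arr.length 1)
    = dpVals (arr.take n) ++ List.replicate (arr.length - n) 1 := by
  intro n
  induction n with
  | zero => intro _; simp [PySem.List.pyRange_one_eq_nil, dpVals, dpPairs]
  | succ n ih =>
    intro hn
    have hlt : n < arr.length := by omega
    rw [show ((n + 1 : Nat) : Int) = (n : Int) + 1 by push_cast; ring]
    rw [PySem.List.pyRange_one_succ_right (by positivity), List.foldl_append, ih (by omega)]
    simp only [List.foldl_cons, List.foldl_nil]
    have hrep : List.replicate (arr.length - n) (1:Int) = 1 :: List.replicate (arr.length - n - 1) 1 := by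
      rw [← List.replicate_succ]; congr 1; omega
    rw [hrep]
    set P := dpVals (arr.take n) with hPdef
    set S := List.replicate (arr.length - n - 1) (1:Int) with hSdef
    have hPlen : P.length = n := by
      rw [hPdef, length_dpVals, List.length_take]; omega
    have hstep1 := step1 arr (P ++ 1 :: S) (n : Int) (PySem.List.pyRange 0 (n : Int) 1)
      (by intro j hj
          rw [PySem.List.mem_pyRange_one] at hj
          constructor
          · exact hj.1
          · omega)
      P S 1 (by rw [hPlen])
      (by intro c j hj
          rw [PySem.List.mem_pyRange_one] at hj
          rw [pyGetD_append_lt P S c j hj.1 (by rw [hPlen]; exact hj.2),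
              pyGetD_append_lt P S 1 j hj.1 (by rw [hPlen]; exact hj.2)])
    rw [hstep1]
    have hstep2 := step2 (fun st v w =>
        if PySem.List.pyGetD arr (n : Int) 0 ≤ v then st
        else if st < w + 1 then st + 1 else st) arr (P ++ 1 :: S)
      (PySem.List.pyRange 0 (n : Int) 1) (dpPairs (arr.take n)) 1
      (by rw [PySem.List.length_pyRange_one, length_dpPairs, List.length_take]; omega)
      (by intro k hk
          rw [length_dpPairs, List.length_take] at hk
          have hkn : k < n := by omega
          have hjk : (PySem.List.pyRange 0 (n : Int) 1)[k]'(by rw [PySem.List.length_pyRange_one]; omega) = (k : Int) := by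
            rw [PySem.List.getElem_pyRange_one]; ring
          constructor
          · rw [hjk, PySem.List.pyGetD_natCast, List.getD_eq_getElem _ _ (by omega)]
            have h2 := List.getElem_of_eq (map_fst_dpPairs (arr.take n)).symm
              (show k < (arr.take n).length by simp [List.length_take]; omega)
            simp only [List.getElem_map, List.getElem_take] at h2
            exact h2
          · rw [hjk]
            rw [pyGetD_append_lt P S 1 (k : Int) (by positivity) (by rw [hPlen]; exact_mod_cast hkn)]
            rw [PySem.List.pyGetD_natCast, List.getD_eq_getElem _ _ (by rw [hPlen]; omega)]
            simp [hPdef, dpVals])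
    rw [hstep2]
    have hx : PySem.List.pyGetD arr (n : Int) 0 = arr[n] := by
      rw [PySem.List.pyGetD_natCast, List.getD_eq_getElem _ _ hlt]
    have hiv : (dpPairs (arr.take n)).foldl (fun st p =>
        if PySem.List.pyGetD arr (n : Int) 0 ≤ p.1 then st
        else if st < p.2 + 1 then st + 1 else st) 1
        = incrVal (dpPairs (arr.take n)) (PySem.List.pyGetD arr (n : Int) 0) := rfl
    rw [hiv, incrVal_eq_dp _ (arr.take n) _ rfl]
    have htake : arr.take (n + 1) = arr.take n ++ [arr[n]] := by
      rw [← List.take_concat_get (h := hlt), List.concat_eq_append]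
    have hdv : dpVals (arr.take (n + 1)) = P ++ [1 + maxF (dpPairs (arr.take n)) arr[n]] := by
      rw [htake, dpVals, dpPairs_snoc]; simp [hPdef, dpVals]
    rw [hx, hdv]
    have : arr.length - (n + 1) = arr.length - n - 1 := by omega
    rw [this, ← hSdef]
    simp

theorem fwdA_eq (arr : List Int) : fwdA arr = dpVals arr := by
  have := fwdA_prefix arr arr.length (le_refl _)
  rw [fwdA, this]
  simp


theorem bwd_range_split (L m : Int) (h : 0 ≤ m) (hm : m + 1 ≤ L) :
    PySem.List.pyRange (L - 1) (L - (m + 1) - 1) (-1)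
      = PySem.List.pyRange (L - 1) (L - m - 1) (-1) ++ [L - m - 1] := by
  rw [PySem.List.pyRange_neg_one_eq_reverse, PySem.List.pyRange_neg_one_eq_reverse]
  rw [show L - (m + 1) - 1 + 1 = L - m - 1 by ring, show L - m - 1 + 1 = L - m by ring]
  rw [PySem.List.pyRange_one_cons (by omega)]
  rw [show L - m - 1 + 1 = L - m by ring]
  simp

theorem getElem_rev_drop (arr : List Int) (q k : Nat) (hq : q ≤ arr.length) (hk : k < arr.length - q) :
    ((arr.drop q).reverse)[k]'(by simp; omega) = arr[arr.length - 1 - k]'(by omega) := by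
  rw [List.getElem_reverse, List.getElem_drop]
  apply getElem_congr rfl _ _
  simp
  omega

theorem getElem_rev_dpVals (t : List Int) (k m : Nat) (hm : t.length = m) (hk : k < m) :
    ((dpVals t).reverse)[m - 1 - k]'(by simp [length_dpVals]; omega)
      = ((dpPairs t)[k]'(by rw [length_dpPairs]; omega)).2 := by
  subst hm
  rw [List.getElem_reverse]
  have hidx : (dpVals t).length - 1 - (t.length - 1 - k) = k := by rw [length_dpVals]; omega
  rw [getElem_congr rfl hidx (by rw [length_dpVals]; omega)]
  simp [dpVals]

theorem bwdA_prefix (arr : List Int) : ∀ m, m ≤ arr.length →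
    (PySem.List.pyRange ((arr.length : Int) - 1) ((arr.length : Int) - m - 1) (-1)).foldl
      (fun r2 i =>
      (PySem.List.pyRange ((arr.length : Int) - 1) i (-1)).foldl (fun r2 j =>
        if PySem.List.pyGetD arr i 0 ≤ PySem.List.pyGetD arr j 0 then r2
        else if PySem.List.pyGetD r2 i 0 < PySem.List.pyGetD r2 j 0 + 1 then
          PySem.List.pySetD r2 i (PySem.List.pyGetD r2 i 0 + 1)
        else r2) r2) (List.replicate arr.length 1)
    = List.replicate (arr.length - m) 1 ++ (dpVals ((arr.drop (arr.length - m)).reverse)).reverse := by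
  intro m
  induction m with
  | zero =>
    intro _
    rw [PySem.List.pyRange_neg_one_eq_nil (by omega)]
    simp [dpVals, dpPairs]
  | succ m ih =>
    intro hm
    have hlen : m + 1 ≤ arr.length := hm
    set L : Int := (arr.length : Int) with hL
    have hcast : L - (↑(m + 1) : Int) - 1 = L - (m : Int) - 1 - 1 := by push_cast; ring
    rw [hcast, show L - (m:Int) - 1 - 1 = L - ((m:Int) + 1) - 1 by ring,
      bwd_range_split L m (by positivity) (by rw [hL]; omega), List.foldl_append, ih (by omega)]
    simp only [List.foldl_cons, List.foldl_nil]
    -- names for the pieces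
    set n0 : Nat := arr.length - m - 1 with hn0
    have hi0 : L - (m:Int) - 1 = ((n0 : Nat) : Int) := by rw [hL, hn0]; omega
    set t : List Int := (arr.drop (arr.length - m)).reverse with ht
    have htlen : t.length = m := by rw [ht]; simp; omega
    set Srev : List Int := (dpVals t).reverse with hSrev
    have hSlen : Srev.length = m := by rw [hSrev]; simp [length_dpVals, htlen]
    set P : List Int := List.replicate n0 (1:Int) with hP
    have hPlen : P.length = n0 := by rw [hP]; simp
    have hsplit : List.replicate (arr.length - m) (1:Int) ++ Srev = P ++ 1 :: Srev := by
      rw [hP, show arr.length - m = n0 + 1 by omega, List.replicate_succ']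
      simp
    rw [hsplit]
    have hstep1 := step1 arr (P ++ 1 :: Srev) (L - (m:Int) - 1)
      (PySem.List.pyRange (L - 1) (L - (m:Int) - 1) (-1))
      (by intro j hj
          rw [PySem.List.mem_pyRange_neg_one] at hj
          constructor
          · rw [hL] at hj; omega
          · omega)
      P Srev 1 (by rw [hPlen, hi0])
      (by intro c j hj
          rw [PySem.List.mem_pyRange_neg_one] at hj
          have hPj : (P.length : Int) < j := by rw [hPlen]; rw [hL] at hj; omega
          rw [pyGetD_append_gt P Srev c j hPj, pyGetD_append_gt P Srev 1 j hPj])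
    rw [hstep1]
    have hstep2 := step2 (fun st v w =>
        if PySem.List.pyGetD arr (L - (m:Int) - 1) 0 ≤ v then st
        else if st < w + 1 then st + 1 else st) arr (P ++ 1 :: Srev)
      (PySem.List.pyRange (L - 1) (L - (m:Int) - 1) (-1)) (dpPairs t) 1
      (by rw [PySem.List.length_pyRange_neg_one, length_dpPairs, htlen]; rw [hL]; omega)
      (by intro k hk
          rw [length_dpPairs, htlen] at hk
          have hjk : (PySem.List.pyRange (L - 1) (L - (m:Int) - 1) (-1))[k]'(by
              rw [PySem.List.length_pyRange_neg_one]; rw [hL]; omega) = L - 1 - (k : Int) := by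
            have h9 := List.getElem_of_eq (PySem.List.pyRange_neg_one (L - 1) (L - (m:Int) - 1))
              (show k < (PySem.List.pyRange (L - 1) (L - (m:Int) - 1) (-1)).length by
                rw [PySem.List.length_pyRange_neg_one]; rw [hL]; omega)
            simpa using h9
          have hLk : L - 1 - (k : Int) = ((arr.length - 1 - k : Nat) : Int) := by rw [hL]; omega
          constructor
          · rw [hjk, hLk, PySem.List.pyGetD_natCast,
              List.getD_eq_getElem _ _ (by omega)]
            have h2 := List.getElem_of_eq (map_fst_dpPairs t).symm
              (show k < t.length by omega)
            simp only [List.getElem_map] at h2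
            rw [← h2]
            exact (getElem_rev_drop arr (arr.length - m) k (by omega) (by omega)).symm
          · rw [hjk]
            have hPj : (P.length : Int) < L - 1 - (k : Int) := by rw [hPlen, hL, hn0]; omega
            rw [pyGetD_append_gt P Srev 1 _ hPj]
            have hidx : L - 1 - (k:Int) - (P.length : Int) - 1 = ((m - 1 - k : Nat) : Int) := by
              rw [hPlen, hL, hn0]; omega
            rw [hidx, PySem.List.pyGetD_natCast, List.getD_eq_getElem _ _ (by rw [hSlen]; omega)]
            exact getElem_rev_dpVals t k m htlen (by omega))
    rw [hstep2]
    have hx : PySem.List.pyGetD arr (L - (m:Int) - 1) 0 = arr[n0]'(by omega) := by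
      rw [hi0, PySem.List.pyGetD_natCast, List.getD_eq_getElem _ _ (by omega)]
    have hiv : (dpPairs t).foldl (fun st p =>
        if PySem.List.pyGetD arr (L - (m:Int) - 1) 0 ≤ p.1 then st
        else if st < p.2 + 1 then st + 1 else st) 1
        = incrVal (dpPairs t) (PySem.List.pyGetD arr (L - (m:Int) - 1) 0) := rfl
    rw [hiv, incrVal_eq_dp _ t _ rfl, hx]
    have hdrop : arr.drop (arr.length - (m + 1)) = arr[n0]'(by omega) :: arr.drop (arr.length - m) := by
      rw [show arr.length - (m + 1) = n0 by omega, List.drop_eq_getElem_cons (by omega),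
        show n0 + 1 = arr.length - m by omega]
    have hnew : (dpVals ((arr.drop (arr.length - (m + 1))).reverse)).reverse
        = (1 + maxF (dpPairs t) (arr[n0]'(by omega))) :: Srev := by
      rw [hdrop]
      simp only [List.reverse_cons]
      rw [← ht, dpVals, dpPairs_snoc]
      simp [hSrev, dpVals]
    rw [hnew, show arr.length - (m + 1) = n0 by omega, ← hP]

theorem bwdA_eq (arr : List Int) : bwdA arr = (dpVals arr.reverse).reverse := by
  have h0 := bwdA_prefix arr arr.length (le_refl _)
  rw [show ((arr.length : Int) - (arr.length : Nat) - 1) = (-1:Int) by push_cast; ring] at h0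
  rw [bwdA, h0]
  simp




theorem countP_of_bounds (tails : List Int) (x : Int) (r : Nat) (hr : r ≤ tails.length)
    (h1 : ∀ k, (hk : k < r) → tails[k]'(by omega) < x)
    (h2 : ∀ k, (hk : k < tails.length) → r ≤ k → ¬ tails[k] < x) :
    tails.countP (fun t => decide (t < x)) = r := by
  conv_lhs => rw [← List.take_append_drop r tails]
  rw [List.countP_append]
  have hT : (tails.take r).countP (fun t => decide (t < x)) = r := by
    rw [List.countP_eq_length.mpr, List.length_take]
    · omega
    · intro y hy
      rw [List.mem_iff_getElem] at hy
      obtain ⟨i, hi, rfl⟩ := hy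
      have hir : i < r := by simp [List.length_take] at hi; omega
      rw [List.getElem_take]
      simpa using h1 i hir
  have hD : (tails.drop r).countP (fun t => decide (t < x)) = 0 := by
    rw [List.countP_eq_zero]
    intro y hy
    rw [List.mem_iff_getElem] at hy
    obtain ⟨i, hi, rfl⟩ := hy
    rw [List.getElem_drop]
    simp only [List.length_drop] at hi
    simpa using h2 (r + i) (by omega) (by omega)
  omega

theorem bsLoop_inv (tails : List Int) (x : Int) (lo hi : Nat)
    (hhi : hi ≤ tails.length) (hlo : lo ≤ hi)
    (hs : tails.Pairwise (· < ·))
    (h1 : ∀ k, (hk : k < lo) → tails[k]'(by omega) < x)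
    (h2 : ∀ k, (hk : k < tails.length) → hi ≤ k → ¬ tails[k] < x) :
    bsLoop tails x lo hi = tails.countP (fun t => decide (t < x)) := by
  rw [bsLoop]
  split
  case isTrue h =>
    have hmid : lo ≤ (lo + hi) / 2 ∧ (lo + hi) / 2 < hi := by omega
    have hmlen : (lo + hi) / 2 < tails.length := by omega
    have hget : PySem.List.pyGetD tails (((lo + hi) / 2 : Nat) : Int) 0 = tails[(lo + hi) / 2] := by
      rw [PySem.List.pyGetD_natCast, List.getD_eq_getElem _ _ hmlen]
    simp only [hget]
    split
    case isTrue hc =>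
      exact bsLoop_inv tails x ((lo + hi) / 2 + 1) hi hhi (by omega) hs
        (fun k hk => by
          rcases Nat.lt_or_ge k ((lo + hi) / 2) with hk' | hk'
          · exact lt_trans (List.pairwise_iff_getElem.mp hs k _ (by omega) hmlen hk') hc
          · have : k = (lo + hi) / 2 := by omega
            subst this; exact hc)
        h2
    case isFalse hc =>
      exact bsLoop_inv tails x lo ((lo + hi) / 2) (by omega) (by omega) hs h1
        (fun k hk hge => by
          rcases Nat.lt_or_ge k ((lo + hi) / 2 + 1) with hk' | hk'
          · have : k = (lo + hi) / 2 := by omega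
            subst this; exact hc
          · intro hcon
            exact hc (lt_trans (List.pairwise_iff_getElem.mp hs _ k hmlen hk (by omega)) hcon))
  case isFalse h =>
    have : lo = hi := by omega
    subst this
    exact (countP_of_bounds tails x lo (by omega) h1 (fun k hk hge => h2 k hk (by omega))).symm
termination_by hi - lo
decreasing_by
  · omega
  · omega

def InvT (p tails : List Int) : Prop :=
  tails.Pairwise (· < ·) ∧
  (∀ k, (hk : k < tails.length) → ∃ q ∈ dpPairs p, ((k : Int) + 1 ≤ q.2 ∧ q.1 = tails[k])) ∧
  (∀ q ∈ dpPairs p, q.2 ≤ (tails.length : Int) ∧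
     ∀ k, (hk : k < tails.length) → ((k : Int) + 1 ≤ q.2 → tails[k] ≤ q.1))

theorem maxF_le_len (p tails : List Int) (x : Int) (hInv : InvT p tails) :
    maxF (dpPairs p) x ≤ (tails.length : Int) := by
  rcases lt_or_ge 0 (maxF (dpPairs p) x) with h | h
  · obtain ⟨q, hq, _, hqv⟩ := maxF_attain (dpPairs p) x h
    rw [← hqv]
    exact (hInv.2.2 q hq).1
  · omega

theorem lo_spec (p tails : List Int) (x : Int) (hInv : InvT p tails) :
    bsLoop tails x 0 tails.length = (maxF (dpPairs p) x).toNat := by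
  have hM0 := maxF_nonneg (dpPairs p) x
  have hMlen := maxF_le_len p tails x hInv
  have h1 : ∀ k, (hk : k < (maxF (dpPairs p) x).toNat) → tails[k]'(by omega) < x := by
    intro k hk
    have hMpos : 0 < maxF (dpPairs p) x := by omega
    obtain ⟨q, hq, hqx, hqv⟩ := maxF_attain (dpPairs p) x hMpos
    have h5 := (hInv.2.2 q hq).2 k (by omega) (by omega)
    omega
  have h2 : ∀ k, (hk : k < tails.length) → (maxF (dpPairs p) x).toNat ≤ k → ¬ tails[k] < x := by
    intro k hk hgek
    obtain ⟨q, hq, hq2, hq1⟩ := hInv.2.1 k hk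
    intro hcon
    have := maxF_ub (dpPairs p) x q hq (by omega)
    omega
  rw [bsLoop_inv tails x 0 tails.length (le_refl _) (by omega) hInv.1
    (fun k hk => by omega) (fun k hk hge => by omega),
    countP_of_bounds tails x _ (by omega) h1 h2]

theorem mem_dpPairs_snoc (p : List Int) (x : Int) (q : Int × Int) (h : q ∈ dpPairs p) :
    q ∈ dpPairs (p ++ [x]) := by
  rw [dpPairs_snoc]; exact List.mem_append_left _ h

theorem lisStep_inv (p tails out : List Int) (x : Int) (hInv : InvT p tails) :
    InvT (p ++ [x]) (lisStep (tails, out) x).1 ∧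
      (lisStep (tails, out) x).2 = out ++ [1 + maxF (dpPairs p) x] := by
  obtain ⟨hs, hI3, hI4⟩ := hInv
  set M := maxF (dpPairs p) x with hMdef
  have hM0 : 0 ≤ M := maxF_nonneg _ _
  have hMlen : M ≤ (tails.length : Int) := maxF_le_len p tails x ⟨hs, hI3, hI4⟩
  have hlo : bsLoop tails x 0 tails.length = M.toNat := lo_spec p tails x ⟨hs, hI3, hI4⟩
  have hMcast : ((M.toNat : Nat) : Int) = M := Int.toNat_of_nonneg hM0
  -- tails entries below M are < x, entries from M on are ≥ x
  have hlt : ∀ k, (hk : k < M.toNat) → tails[k]'(by omega) < x := by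
    intro k hk
    have hMpos : 0 < M := by omega
    obtain ⟨q, hq, hqx, hqv⟩ := maxF_attain (dpPairs p) x hMpos
    have := (hI4 q hq).2 k (by omega) (by omega)
    omega
  have hge : ∀ k, (hk : k < tails.length) → M.toNat ≤ k → ¬ tails[k] < x := by
    intro k hk hgek
    obtain ⟨q, hq, hq2, hq1⟩ := hI3 k hk
    intro hcon
    have := maxF_ub (dpPairs p) x q hq (by omega)
    omega
  have hdp := dpPairs_snoc p x
  have houtv : ((M.toNat : Int) + 1) = 1 + M := by omega
  constructor
  · -- invariant for the new tails
    simp only [lisStep, hlo]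
    by_cases hcase : M.toNat = tails.length
    · rw [if_pos hcase]
      refine ⟨?_, ?_, ?_⟩
      · rw [List.pairwise_append]
        refine ⟨hs, by simp, ?_⟩
        intro a ha b hb
        simp at hb; subst hb
        rw [List.mem_iff_getElem] at ha
        obtain ⟨i, hi, rfl⟩ := ha
        exact hlt i (by omega)
      · intro k hk
        simp only [List.length_append, List.length_cons, List.length_nil] at hk
        rcases Nat.lt_or_ge k tails.length with hk' | hk'
        · obtain ⟨q, hq, hq2, hq1⟩ := hI3 k hk'
          exact ⟨q, mem_dpPairs_snoc p x q hq, hq2,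
            by rw [List.getElem_append_left hk']; exact hq1⟩
        · have hkeq : k = tails.length := by omega
          subst hkeq
          refine ⟨(x, 1 + M), by rw [hdp]; exact List.mem_append_right _ (by simp [hMdef]), ?_, ?_⟩
          · omega
          · rw [List.getElem_concat_length]
            rfl
      · intro q hq
        rw [hdp] at hq
        rcases List.mem_append.1 hq with hq' | hq'
        · have h4 := hI4 q hq'
          refine ⟨by simp; omega, ?_⟩
          intro k hk hk2
          have hk' : k < tails.length := by
            have := h4.1
            omega
          rw [List.getElem_append_left hk']
          exact h4.2 k hk' hk2
        · simp at hq'; subst hq'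
          refine ⟨by simp; omega, ?_⟩
          intro k hk hk2
          simp only [] at hk2
          rcases Nat.lt_or_ge k tails.length with hk' | hk'
          · rw [List.getElem_append_left hk']
            exact le_of_lt (hlt k (by omega))
          · have hkeq : k = tails.length := by
              simp at hk; omega
            subst hkeq
            rw [List.getElem_concat_length]
            rfl
    · rw [if_neg hcase]
      have hloLt : M.toNat < tails.length := by omega
      have hgeLo : ¬ tails[M.toNat] < x := hge M.toNat hloLt (le_refl _)
      refine ⟨?_, ?_, ?_⟩
      · rw [List.pairwise_iff_getElem]
        intro i j hi hj hij
        simp only [List.length_set] at hi hj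
        rw [List.getElem_set, List.getElem_set]
        have hpw := List.pairwise_iff_getElem.mp hs
        by_cases hiM : M.toNat = i
        · rw [if_pos hiM]
          rw [if_neg (show ¬ M.toNat = j by omega)]
          have h7 : tails[M.toNat] < tails[j] := hpw _ j hloLt hj (by omega)
          omega
        · rw [if_neg hiM]
          by_cases hjM : M.toNat = j
          · rw [if_pos hjM]
            exact hlt i (by omega)
          · rw [if_neg hjM]
            exact hpw i j hi hj hij
      · intro k hk
        simp only [List.length_set] at hk
        by_cases hkM : M.toNat = k
        · subst hkM
          refine ⟨(x, 1 + M), by rw [hdp]; exact List.mem_append_right _ (by simp [hMdef]), by simp; omega,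
            by rw [List.getElem_set]; simp⟩
        · obtain ⟨q, hq, hq2, hq1⟩ := hI3 k hk
          refine ⟨q, mem_dpPairs_snoc p x q hq, hq2, ?_⟩
          rw [List.getElem_set, if_neg hkM]
          exact hq1
      · intro q hq
        rw [hdp] at hq
        rcases List.mem_append.1 hq with hq' | hq'
        · have h4 := hI4 q hq'
          refine ⟨by simp; exact h4.1, ?_⟩
          intro k hk hk2
          simp only [List.length_set] at hk
          rw [List.getElem_set]
          by_cases hkM : M.toNat = k
          · rw [if_pos hkM]
            by_contra hcon
            push_neg at hcon
            have := maxF_ub (dpPairs p) x q hq' (by omega)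
            subst hkM
            omega
          · rw [if_neg hkM]
            exact h4.2 k hk hk2
        · simp at hq'; subst hq'
          refine ⟨by simp; omega, ?_⟩
          intro k hk hk2
          simp only [List.length_set] at hk
          simp only [] at hk2
          rw [List.getElem_set]
          by_cases hkM : M.toNat = k
          · rw [if_pos hkM]
          · rw [if_neg hkM]
            exact le_of_lt (hlt k (by omega))
  · simp only [lisStep, hlo]
    rw [houtv]

theorem dpVals_snoc (a : List Int) (x : Int) :
    dpVals (a ++ [x]) = dpVals a ++ [1 + maxF (dpPairs a) x] := by
  simp [dpVals, dpPairs_snoc]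

theorem lis_all (p : List Int) :
    InvT p (p.foldl lisStep ([], [])).1 ∧ (p.foldl lisStep ([], [])).2 = dpVals p := by
  induction p using List.reverseRecOn with
  | nil =>
    refine ⟨⟨List.Pairwise.nil, by simp, by simp [dpPairs]⟩, by simp [dpVals, dpPairs]⟩
  | append_singleton p x ih =>
    rw [List.foldl_append, List.foldl_cons, List.foldl_nil]
    obtain ⟨hI, hout⟩ := ih
    have hstep := lisStep_inv p (p.foldl lisStep ([], [])).1 (p.foldl lisStep ([], [])).2 x hI
    constructor
    · exact hstep.1
    · rw [hstep.2, hout, dpVals_snoc]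

theorem lisLengths_eq (a : List Int) : lisLengths a = dpVals a := (lis_all a).2



theorem fill_loop (res1 res2 : List Int) (c : Nat) : ∀ n, n ≤ c →
    (PySem.List.pyRange 0 (n : Int) 1).foldl (fun r i =>
      PySem.List.pySetD r i (PySem.List.pyGetD res1 i 0 + PySem.List.pyGetD res2 i 0))
      (List.replicate c 0)
    = (PySem.List.pyRange 0 (n : Int) 1).map
        (fun i => PySem.List.pyGetD res1 i 0 + PySem.List.pyGetD res2 i 0)
      ++ List.replicate (c - n) 0 := by
  intro n
  induction n with
  | zero => intro _; simp [PySem.List.pyRange_one_eq_nil]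
  | succ n ih =>
    intro hn
    rw [show ((n + 1 : Nat) : Int) = (n : Int) + 1 by push_cast; ring]
    rw [PySem.List.pyRange_one_succ_right (by positivity), List.foldl_append, ih (by omega),
      List.map_append]
    simp only [List.foldl_cons, List.foldl_nil, List.map_cons, List.map_nil]
    have hrep : List.replicate (c - n) (0:Int) = 0 :: List.replicate (c - n - 1) 0 := by
      rw [← List.replicate_succ]; congr 1; omega
    rw [hrep]
    set P := (PySem.List.pyRange 0 (n : Int) 1).map
      (fun i => PySem.List.pyGetD res1 i 0 + PySem.List.pyGetD res2 i 0) with hPdef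
    have hPlen : P.length = n := by
      rw [hPdef, List.length_map, PySem.List.length_pyRange_one]; omega
    have := pySetD_append_self P (List.replicate (c - n - 1) 0) 0
      (PySem.List.pyGetD res1 (n:Int) 0 + PySem.List.pyGetD res2 (n:Int) 0)
    rw [hPlen] at this
    rw [this]
    rw [show c - (n + 1) = c - n - 1 by omega]
    simp

theorem getD_reverse (D : List Int) (n : Nat) (hn : n < D.length) :
    PySem.List.pyGetD D.reverse (n : Int) 0 = PySem.List.pyGetD D ((D.length - 1 - n : Nat) : Int) 0 := by
  rw [PySem.List.pyGetD_natCast, PySem.List.pyGetD_natCast,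
    List.getD_eq_getElem _ _ (by simp; omega), List.getD_eq_getElem _ _ (by omega),
    List.getElem_reverse]

theorem solution_eq_alt (arr : List Int) (h : arr ≠ []) : solution arr = solution_alt arr := by
  have hc : 0 < arr.length := List.length_pos_iff.mpr h
  show (arr.length : Int) - (PySem.List.max? _ (fun y => y)).getD 0 + 1
      = (arr.length : Int) - (PySem.List.max? _ (fun y => y)).getD 0 + 1
  rw [fwdA_eq, bwdA_eq, lisLengths_eq arr, lisLengths_eq arr.reverse,
    fill_loop (dpVals arr) ((dpVals arr.reverse).reverse) arr.length arr.length (le_refl _)]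
  simp only [Nat.sub_self, List.replicate_zero, List.append_nil]
  have hmap : (PySem.List.pyRange 0 (arr.length : Int) 1).map
      (fun i => PySem.List.pyGetD (dpVals arr) i 0
        + PySem.List.pyGetD (dpVals arr.reverse).reverse i 0)
      = (PySem.List.pyRange 0 (arr.length : Int) 1).map
      (fun i => PySem.List.pyGetD (dpVals arr) i 0
        + PySem.List.pyGetD (dpVals arr.reverse) ((arr.length : Int) - 1 - i) 0) := by
    apply List.map_congr_left
    intro i hi
    rw [PySem.List.mem_pyRange_one] at hi
    obtain ⟨n, rfl⟩ := Int.eq_ofNat_of_zero_le hi.1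
    have hn : n < arr.length := by exact_mod_cast hi.2
    have hrev := getD_reverse (dpVals arr.reverse) n (by rw [length_dpVals]; simp; omega)
    rw [hrev]
    congr 2
    rw [length_dpVals, List.length_reverse]
    omega
  rw [hmap]

-- ===== VERDICT (by name: the statement is the Claim_ definition above) =====
theorem solution_spec : Claim_equal_solution := by
  intro arr _ hpre
  show solution arr = solution_alt arr
  exact solution_eq_alt arr hpre
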